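-- pv_equiv track=rewrite | github.com/Mapet13/Studia | ćwiczenia 6/18.py | try_to_move_king
-- ===== SOURCE A (Python) =====
-- T = [
--     [32, 9,  9,  9,  9,  9,  9,  9],
--     [9,  32, 9,  9,  9,  9,  9,  9],
--     [9,  9,  32, 32, 9,  9,  9,  9],
--     [9,  9,  9,  9,  32, 32, 9,  9],
--     [9,  9,  9,  9,  9,  9,  32, 9],
--     [9,  9,  9,  9,  9,  9,  9,  32],
--     [9,  9,  9,  9,  9,  9,  9,  32],
--     [9,  9,  9,  9,  9,  9,  9,  32],
-- ]
--
-- def assert_first_digit(x, d):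
--     while x != x % 10:
--         x //= 10
--     return x > d
--
-- def try_to_move_king(w, k):
--     if w >= 8 or w < 0 or k < 0 or k >= 8:
--         return False
--
--     if w == 7 and k == 7:
--         return True
--
--     last_digit = T[w][k] % 10
--
--     return ((w < 7 and k < 7 and assert_first_digit(T[w+1][k+1], last_digit) and try_to_move_king(w+1, k+1))
--             or (w < 7 and assert_first_digit(T[w+1][k], last_digit) and try_to_move_king(w+1, k))
--             or (k < 7 and assert_first_digit(T[w][k+1], last_digit) and try_to_move_king(w, k+1)))
-- ===== SOURCE B (Python) =====
-- T = [
--     [32, 9,  9,  9,  9,  9,  9,  9],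
--     [9,  32, 9,  9,  9,  9,  9,  9],
--     [9,  9,  32, 32, 9,  9,  9,  9],
--     [9,  9,  9,  9,  32, 32, 9,  9],
--     [9,  9,  9,  9,  9,  9,  32, 9],
--     [9,  9,  9,  9,  9,  9,  9,  32],
--     [9,  9,  9,  9,  9,  9,  9,  32],
--     [9,  9,  9,  9,  9,  9,  9,  32],
-- ]
--
-- def assert_first_digit(x, d):
--     while x != x % 10:
--         x //= 10
--     return x > d
--
-- def try_to_move_king(w, k):
--     if w >= 8 or w < 0 or k < 0 or k >= 8:
--         return False
--     stack = [(w, k)]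
--     while stack:
--         cw, ck = stack.pop()
--         if cw == 7 and ck == 7:
--             return True
--         d = T[cw][ck] % 10
--         for nw, nk in ((cw + 1, ck + 1), (cw + 1, ck), (cw, ck + 1)):
--             if nw < 8 and nk < 8 and assert_first_digit(T[nw][nk], d):
--                 stack.append((nw, nk))
--     return False
-- ===== Notes on version B (the rewrite author's own statement) =====
-- stated objective: alternative
-- what changed: The triple-branch boolean recursion is replaced by an iterative reachability search with an explicit stack of cells, keeping the same bounds guard, goal test and move conditions.
import Mathlib
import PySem

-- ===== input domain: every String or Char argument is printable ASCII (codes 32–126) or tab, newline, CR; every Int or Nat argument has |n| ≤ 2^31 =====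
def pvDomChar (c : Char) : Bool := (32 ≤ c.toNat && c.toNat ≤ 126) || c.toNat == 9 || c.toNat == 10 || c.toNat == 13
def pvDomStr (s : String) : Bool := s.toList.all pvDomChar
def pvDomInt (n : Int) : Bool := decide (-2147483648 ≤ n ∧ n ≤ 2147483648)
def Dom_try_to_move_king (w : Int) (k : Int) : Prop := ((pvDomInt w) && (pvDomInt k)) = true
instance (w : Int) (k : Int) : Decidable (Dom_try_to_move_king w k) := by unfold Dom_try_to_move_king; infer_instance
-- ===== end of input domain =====

-- B replaces A's triple-branch recursion by an iterative search over an explicit stack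
-- (objective: alternative decomposition; same result, reachability is order-independent).

-- ===== PORT A =====
-- the global grid T
def Tgrid : List (List Int) :=
  [[32, 9,  9,  9,  9,  9,  9,  9],
   [9,  32, 9,  9,  9,  9,  9,  9],
   [9,  9,  32, 32, 9,  9,  9,  9],
   [9,  9,  9,  9,  32, 32, 9,  9],
   [9,  9,  9,  9,  9,  9,  32, 9],
   [9,  9,  9,  9,  9,  9,  9,  32],
   [9,  9,  9,  9,  9,  9,  9,  32],
   [9,  9,  9,  9,  9,  9,  9,  32]]

-- T[w][k]; every access in both ports is guarded in range, so the default is never used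
def Tget (w k : Int) : Int :=
  (PySem.List.pyGet? ((PySem.List.pyGet? Tgrid w).getD []) k).getD 0

-- the while-loop of assert_first_digit; fuel x.natAbs+1 covers every terminating Python run
def afdLoop : Nat → Int → Int
  | 0, x => x
  | f + 1, x =>
    if x ≠ PySem.Int.mod x 10 then afdLoop f (PySem.Int.floordiv x 10) else x

def assert_first_digit (x d : Int) : Bool :=
  decide (afdLoop (x.natAbs + 1) x > d)

-- A's recursion; fuel is only a totality guard (depth ≤ 15 since w+k grows each call)
def tmkFuel : Nat → Int → Int → Bool
  | 0, _, _ => false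
  | f + 1, w, k =>
    if w ≥ 8 ∨ w < 0 ∨ k < 0 ∨ k ≥ 8 then false
    else if w = 7 ∧ k = 7 then true
    else
      let last_digit := PySem.Int.mod (Tget w k) 10
      ((decide (w < 7) && decide (k < 7) && assert_first_digit (Tget (w+1) (k+1)) last_digit && tmkFuel f (w+1) (k+1))
        || (decide (w < 7) && assert_first_digit (Tget (w+1) k) last_digit && tmkFuel f (w+1) k)
        || (decide (k < 7) && assert_first_digit (Tget w (k+1)) last_digit && tmkFuel f w (k+1)))

def try_to_move_king (w : Int) (k : Int) : Bool := tmkFuel 32 w k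

-- ===== PORT B =====
-- the while-loop over the explicit stack (head = top of stack, i.e. Python's list end);
-- fuel is only a totality guard (at most 20 pops occur on any run from an in-range start)
def altLoop : Nat → List (Int × Int) → Bool
  | 0, _ => false
  | _ + 1, [] => false
  | f + 1, (cw, ck) :: rest =>
    if cw = 7 ∧ ck = 7 then true
    else
      let d := PySem.Int.mod (Tget cw ck) 10
      let s1 := if decide (cw + 1 < 8) && decide (ck + 1 < 8) && assert_first_digit (Tget (cw+1) (ck+1)) d
                then (cw + 1, ck + 1) :: rest else rest
      let s2 := if decide (cw + 1 < 8) && decide (ck < 8) && assert_first_digit (Tget (cw+1) ck) d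
                then (cw + 1, ck) :: s1 else s1
      let s3 := if decide (cw < 8) && decide (ck + 1 < 8) && assert_first_digit (Tget cw (ck+1)) d
                then (cw, ck + 1) :: s2 else s2
      altLoop f s3

def try_to_move_king_alt (w : Int) (k : Int) : Bool :=
  if w ≥ 8 ∨ w < 0 ∨ k < 0 ∨ k ≥ 8 then false
  else altLoop 64 [(w, k)]

-- ===== PRECONDITION & SPEC =====
def Spec_try_to_move_king (w : Int) (k : Int) (out : Bool) : Prop := out = try_to_move_king_alt w k
instance (w : Int) (k : Int) (out : Bool) : Decidable (Spec_try_to_move_king w k out) := by unfold Spec_try_to_move_king; infer_instance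

-- ===== CLAIM (what is proved, stated in full; the proofs are below) =====
def Claim_equal_try_to_move_king : Prop := ∀ (w : Int) (k : Int), Dom_try_to_move_king w k → Spec_try_to_move_king w k (try_to_move_king w k)

-- ===== LEMMAS AND PROOFS =====
lemma tmk_out_of_range (w k : Int) (h : w ≥ 8 ∨ w < 0 ∨ k < 0 ∨ k ≥ 8) :
    try_to_move_king w k = false := by
  simp [try_to_move_king, tmkFuel, h]

lemma alt_out_of_range (w k : Int) (h : w ≥ 8 ∨ w < 0 ∨ k < 0 ∨ k ≥ 8) :
    try_to_move_king_alt w k = false := by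
  simp [try_to_move_king_alt, h]

-- ===== VERDICT (by name: the statement is the Claim_ definition above) =====
theorem try_to_move_king_spec : Claim_equal_try_to_move_king := by
  intro w k _
  unfold Spec_try_to_move_king
  by_cases h : w ≥ 8 ∨ w < 0 ∨ k < 0 ∨ k ≥ 8
  · rw [tmk_out_of_range w k h, alt_out_of_range w k h]
  · push Not at h
    obtain ⟨h1, h2, h3, h4⟩ := h
    interval_cases w <;> interval_cases k <;> decide
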